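-- pv_equiv track=rewrite | github.com/st01tyy/LightScale | headquarters_v2.py | _build_initial_gpu_slots
-- ===== SOURCE A (Python) =====
-- from typing import Any, Dict, List, Optional, Sequence, Tuple
--
-- GPU_PER_NODE = 8
--
-- def _build_initial_gpu_slots(
--     total_nodes: int,
--     actor_nodes: int,
--     ref_nodes: int,
-- ) -> Tuple[List[List[int]], List[int]]:
--     """初始化每个节点的可用 GPU 列表，并返回整机空闲节点池。"""
--
--     gpu_slots = [[gpu for gpu in range(GPU_PER_NODE)] for _ in range(total_nodes)]
--     for reserved_node_rank in range(actor_nodes + ref_nodes):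
--         if reserved_node_rank < total_nodes:
--             gpu_slots[reserved_node_rank] = []
--     # whole_node_pool 用于多机实例直接占整台节点，避免与单机多实例争抢。
--     whole_node_pool = [idx for idx, slots in enumerate(gpu_slots) if len(slots) == GPU_PER_NODE]
--     # gpu slots: [[0,1,2,3,4,5,6,7], [], [], [0,1,2,3,4,5,6,7], ...]
--     # whole_node_pool: [0, 3, 4, ...]
--     return gpu_slots, whole_node_pool
-- ===== SOURCE B (Python) =====
-- from typing import List, Tuple
--
-- GPU_PER_NODE = 8
--
-- def _build_initial_gpu_slots(
--     total_nodes: int,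
--     actor_nodes: int,
--     ref_nodes: int,
-- ) -> Tuple[List[List[int]], List[int]]:
--     reserved_eff = max(0, min(actor_nodes + ref_nodes, total_nodes))
--     gpu_slots = [[] if i < reserved_eff else list(range(GPU_PER_NODE))
--                  for i in range(total_nodes)]
--     whole_node_pool = list(range(reserved_eff, total_nodes))
--     return gpu_slots, whole_node_pool
-- ===== Notes on version B (the rewrite author's own statement) =====
-- stated objective: simpler
-- what changed: B clamps the reserved count once and builds both gpu_slots (one comprehension choosing [] below the clamp) and whole_node_pool (a direct range) by arithmetic, removing A's overwrite loop and the length-based enumerate/filter pass.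
import Mathlib
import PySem

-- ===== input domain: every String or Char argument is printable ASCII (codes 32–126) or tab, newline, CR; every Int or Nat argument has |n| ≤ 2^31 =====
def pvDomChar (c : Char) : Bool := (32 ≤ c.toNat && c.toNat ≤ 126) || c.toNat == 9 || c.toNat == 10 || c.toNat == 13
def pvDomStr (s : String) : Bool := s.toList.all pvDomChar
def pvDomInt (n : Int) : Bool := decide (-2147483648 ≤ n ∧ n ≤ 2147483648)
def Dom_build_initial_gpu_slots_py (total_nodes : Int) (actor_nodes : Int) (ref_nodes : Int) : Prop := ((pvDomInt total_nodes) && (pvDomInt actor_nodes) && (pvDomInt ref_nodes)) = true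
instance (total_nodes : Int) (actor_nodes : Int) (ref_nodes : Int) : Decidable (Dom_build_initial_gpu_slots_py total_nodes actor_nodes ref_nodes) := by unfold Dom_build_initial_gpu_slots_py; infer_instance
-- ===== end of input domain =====

-- B replaces A's per-rank overwrite loop and length-filter pass by one clamped comprehension
-- and an arithmetic range for the pool (objective: simpler).

-- ===== PORT A =====
def build_initial_gpu_slots_py (total_nodes : Int) (actor_nodes : Int) (ref_nodes : Int) : List (List Int) × List Int :=
  -- gpu_slots = [[gpu for gpu in range(GPU_PER_NODE)] for _ in range(total_nodes)]
  let gpu_slots : List (List Int) :=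
    (PySem.List.pyRange 0 total_nodes 1).map (fun _ => PySem.List.pyRange 0 8 1)
  -- for reserved_node_rank in range(actor_nodes + ref_nodes): if rank < total: gpu_slots[rank] = []
  let gpu_slots :=
    (PySem.List.pyRange 0 (actor_nodes + ref_nodes) 1).foldl
      (fun gs rank => if rank < total_nodes then gs.set rank.toNat [] else gs) gpu_slots
  -- whole_node_pool = [idx for idx, slots in enumerate(gpu_slots) if len(slots) == GPU_PER_NODE]
  let whole_node_pool : List Int :=
    (PySem.List.enumerate gpu_slots 0).filterMap
      (fun p => if (p.2.length : Int) = 8 then some p.1 else none)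
  (gpu_slots, whole_node_pool)

-- ===== PORT B =====
def build_initial_gpu_slots_py_alt (total_nodes : Int) (actor_nodes : Int) (ref_nodes : Int) : List (List Int) × List Int :=
  let reserved_eff : Int := max 0 (min (actor_nodes + ref_nodes) total_nodes)
  let gpu_slots : List (List Int) :=
    (PySem.List.pyRange 0 total_nodes 1).map
      (fun i => if i < reserved_eff then [] else PySem.List.pyRange 0 8 1)
  (gpu_slots, PySem.List.pyRange reserved_eff total_nodes 1)

-- ===== PRECONDITION & SPEC =====
def Spec_build_initial_gpu_slots_py (total_nodes : Int) (actor_nodes : Int) (ref_nodes : Int) (out : List (List Int) × List Int) : Prop := out = build_initial_gpu_slots_py_alt total_nodes actor_nodes ref_nodes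
instance (total_nodes : Int) (actor_nodes : Int) (ref_nodes : Int) (out : List (List Int) × List Int) : Decidable (Spec_build_initial_gpu_slots_py total_nodes actor_nodes ref_nodes out) := by unfold Spec_build_initial_gpu_slots_py; infer_instance

-- ===== CLAIM (what is proved, stated in full; the proofs are below) =====
def Claim_equal_build_initial_gpu_slots_py : Prop := ∀ (total_nodes : Int) (actor_nodes : Int) (ref_nodes : Int), Dom_build_initial_gpu_slots_py total_nodes actor_nodes ref_nodes → Spec_build_initial_gpu_slots_py total_nodes actor_nodes ref_nodes (build_initial_gpu_slots_py total_nodes actor_nodes ref_nodes)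

-- ===== LEMMAS AND PROOFS =====

-- A's overwrite loop over range(0, n) turns the initial full-slots list into a prefix of empties.
lemma foldA_nat (total : Int) (n : ℕ) :
    (PySem.List.pyRange 0 (n : Int) 1).foldl
      (fun gs rank => if rank < total then gs.set rank.toNat [] else gs)
      ((PySem.List.pyRange 0 total 1).map (fun _ => PySem.List.pyRange 0 8 1))
    = (PySem.List.pyRange 0 total 1).map
        (fun i => if i < (n : Int) then [] else PySem.List.pyRange 0 8 1) := by
  induction n with
  | zero =>
    simp only [Nat.cast_zero]
    rw [PySem.List.pyRange_one_eq_nil le_rfl]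
    simp only [List.foldl_nil]
    refine List.map_congr_left ?_
    intro i hi
    rw [PySem.List.mem_pyRange_one] at hi
    rw [if_neg (by omega)]
  | succ k ih =>
    rw [show ((k + 1 : ℕ) : Int) = (k : Int) + 1 by push_cast; ring]
    rw [PySem.List.pyRange_one_succ_right (by positivity), List.foldl_append, ih]
    simp only [List.foldl_cons, List.foldl_nil]
    by_cases ht : (k : Int) < total
    · rw [if_pos ht]
      apply List.ext_getElem
      · simp
      · intro j h1 h2
        simp only [List.getElem_set, List.getElem_map, PySem.List.getElem_pyRange_one]
        split_ifs <;> first | rfl | omega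
    · rw [if_neg ht]
      refine List.map_congr_left ?_
      intro i hi
      rw [PySem.List.mem_pyRange_one] at hi
      have h : (i < (k : Int)) = (i < (k : Int) + 1) := by apply propext; omega
      simp only [h]

lemma foldA_eq_map (total m : Int) :
    (PySem.List.pyRange 0 m 1).foldl
      (fun gs rank => if rank < total then gs.set rank.toNat [] else gs)
      ((PySem.List.pyRange 0 total 1).map (fun _ => PySem.List.pyRange 0 8 1))
    = (PySem.List.pyRange 0 total 1).map
        (fun i => if i < m then [] else PySem.List.pyRange 0 8 1) := by
  by_cases hm : m ≤ 0
  · rw [PySem.List.pyRange_one_eq_nil hm]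
    simp only [List.foldl_nil]
    refine List.map_congr_left ?_
    intro i hi
    rw [PySem.List.mem_pyRange_one] at hi
    rw [if_neg (by omega)]
  · have hmn : m = ((m.toNat : ℕ) : Int) := by omega
    rw [hmn]
    exact foldA_nat total m.toNat

-- the filterMap over the enumerate of the clamped map is exactly range(reserved, total)
lemma pool_eq_range (total r : Int) (hr0 : 0 ≤ r) (hrt : r ≤ max 0 total) :
    (PySem.List.enumerate
        ((PySem.List.pyRange 0 total 1).map
          (fun i => if i < r then [] else PySem.List.pyRange 0 8 1)) 0).filterMap
      (fun p => if (p.2.length : Int) = 8 then some p.1 else none)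
    = PySem.List.pyRange r total 1 := by
  set f : Int → List Int := fun i => if i < r then [] else PySem.List.pyRange 0 8 1 with hf
  have hfj_lt : ∀ j : Int, j < r → f j = [] := by
    intro j hj; rw [hf]; exact if_pos hj
  have hfj_ge : ∀ j : Int, ¬ j < r → f j = PySem.List.pyRange 0 8 1 := by
    intro j hj; rw [hf]; exact if_neg hj
  have hlen : (((PySem.List.pyRange 0 total 1).map f).length : Int) = max 0 total := by
    simp [PySem.List.length_pyRange_one]; omega
  have hval : ∀ j : Int, 0 ≤ j → j < total →
      PySem.List.pyGetD ((PySem.List.pyRange 0 total 1).map f) j [] = f j := by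
    intro j h0 h1
    exact PySem.List.pyGetD_map_pyRange_of_nonneg f total j [] h0 h1
  rw [PySem.List.enumerate_eq_map_pyRange _ ([] : List Int)]
  simp only [PySem.List.len_eq, hlen]
  have hsplit : PySem.List.pyRange 0 (max 0 total) 1
      = PySem.List.pyRange 0 r 1 ++ PySem.List.pyRange r (max 0 total) 1 :=
    PySem.List.pyRange_one_append 0 r (max 0 total) hr0 hrt
  rw [hsplit, List.map_append, List.filterMap_append]
  have h1 : (List.filterMap
      (fun p : Int × List Int => if (p.2.length : Int) = 8 then some p.1 else none)
      ((PySem.List.pyRange 0 r 1).map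
        (fun j => (j, PySem.List.pyGetD ((PySem.List.pyRange 0 total 1).map f) j [])))) = [] := by
    rw [List.filterMap_eq_nil_iff]
    intro p hp
    rw [List.mem_map] at hp
    obtain ⟨j, hj, rfl⟩ := hp
    rw [PySem.List.mem_pyRange_one] at hj
    have hjt : j < total := by omega
    rw [hval j hj.1 hjt, hfj_lt j hj.2]
    simp
  have h2 : (List.filterMap
      (fun p : Int × List Int => if (p.2.length : Int) = 8 then some p.1 else none)
      ((PySem.List.pyRange r (max 0 total) 1).map
        (fun j => (j, PySem.List.pyGetD ((PySem.List.pyRange 0 total 1).map f) j []))))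
      = PySem.List.pyRange r (max 0 total) 1 := by
    rw [List.filterMap_map]
    have hcong : ∀ j ∈ PySem.List.pyRange r (max 0 total) 1,
        ((fun p : Int × List Int => if (p.2.length : Int) = 8 then some p.1 else none) ∘
          (fun j => (j, PySem.List.pyGetD ((PySem.List.pyRange 0 total 1).map f) j []))) j
        = some j := by
      intro j hj
      rw [PySem.List.mem_pyRange_one] at hj
      have hjt : j < total := by omega
      simp only [Function.comp_apply]
      rw [hval j (by omega) hjt, hfj_ge j (by omega)]
      simp [PySem.List.length_pyRange_one]
    rw [List.filterMap_congr hcong, List.filterMap_some]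
  rw [h1, h2, List.nil_append]
  by_cases ht : 0 ≤ total
  · rw [max_eq_right ht]
  · rw [PySem.List.pyRange_one_eq_nil (by omega), PySem.List.pyRange_one_eq_nil (by omega)]

-- ===== VERDICT (by name: the statement is the Claim_ definition above) =====
theorem build_initial_gpu_slots_py_spec : Claim_equal_build_initial_gpu_slots_py := by
  intro t a r _
  unfold Spec_build_initial_gpu_slots_py
  simp only [build_initial_gpu_slots_py, build_initial_gpu_slots_py_alt]
  have hmap : (PySem.List.pyRange 0 t 1).map
        (fun i => if i < a + r then [] else PySem.List.pyRange 0 8 1)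
      = (PySem.List.pyRange 0 t 1).map
        (fun i => if i < max 0 (min (a + r) t) then [] else PySem.List.pyRange 0 8 1) := by
    refine List.map_congr_left ?_
    intro i hi
    rw [PySem.List.mem_pyRange_one] at hi
    have h : (i < a + r) = (i < max 0 (min (a + r) t)) := by apply propext; omega
    simp only [h]
  rw [foldA_eq_map t (a + r), hmap,
    pool_eq_range t (max 0 (min (a + r) t)) (by omega) (by omega)]
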